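-- pv_equiv track=rewrite | github.com/theandsea/Python-problem-solving | 0403.py | gather_values
-- ===== SOURCE A (Python) =====
-- def map_bitstring(x):
--     """
--     takes a list of bitstrings (i.e., 0101) and
--     maps each bitstring to 0 if the number of 0s in the bitstring strictly exceeds the number of 1s.
--     Otherwise, map that bitstring to 1
--     :param x:
--     :return:
--     """
--     assert isinstance(x,list)
--     for bitstr in x:
--         assert bitstr.replace("0","").replace("1","")=="" # strictly bitstring
--
--     res={}
--     for bitstr in x:
--         if bitstr not in res.keys():
--             if len(bitstr.replace("1",""))>len(bitstr.replace("0","")): # only 0 left > only 1 left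
--                 res[bitstr]=0
--             else:
--                 res[bitstr]=1
--
--     return res
--
-- def gather_values(x):
--     """
--     tally the number of times an existing key is repeated
--     Generate a new dictionary with bitstrings as keys and with values as lists that contain the corresponding mapped values from map_bitstring
--     :param x:
--     :return:
--     """
--     assert isinstance(x,list)
--     mapnum=map_bitstring(x) # already check the format a lot
--
--     res={}
--     for i in range(len(x)):
--         bitstr=x[i]
--         value=mapnum[bitstr]
--         if bitstr in res.keys():
--             res[bitstr].append(value)
--         else:
--             res[bitstr]=[value]
--
--     return res
-- ===== SOURCE B (Python) =====
-- def gather_values(x):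
--     """
--     Same result as the original, built from occurrence counts: tally each
--     bitstring once, then produce each value list by list multiplication.
--     """
--     assert isinstance(x, list)
--     for bitstr in x:
--         assert bitstr.replace("0", "").replace("1", "") == ""  # strictly bitstring
--
--     counts = {}
--     for b in x:
--         counts[b] = counts.get(b, 0) + 1
--
--     return {b: [0 if b.count("0") > b.count("1") else 1] * c
--             for b, c in counts.items()}
-- ===== Notes on version B (the rewrite author's own statement) =====
-- stated objective: simpler
-- what changed: Instead of re-deriving each element's mapped value from a separately built map_bitstring dict and growing per-key lists one append at a time over an index loop, B tallies occurrence counts in one pass and builds each value list directly as [mapped value] * count in a dict comprehension, computing the mapped value from character counts rather than string replacements.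
import Mathlib
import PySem

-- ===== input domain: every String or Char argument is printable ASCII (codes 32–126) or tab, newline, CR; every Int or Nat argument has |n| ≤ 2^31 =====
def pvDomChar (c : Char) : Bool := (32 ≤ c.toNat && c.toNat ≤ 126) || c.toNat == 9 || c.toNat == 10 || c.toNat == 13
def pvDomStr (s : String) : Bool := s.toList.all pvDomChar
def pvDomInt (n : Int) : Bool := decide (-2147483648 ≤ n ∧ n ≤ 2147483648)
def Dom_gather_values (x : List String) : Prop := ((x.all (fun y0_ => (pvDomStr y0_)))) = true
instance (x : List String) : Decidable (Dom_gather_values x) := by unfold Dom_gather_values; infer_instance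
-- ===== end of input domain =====

-- B replaces the per-element append loop (driven by a separate map_bitstring dict) with a one-pass
-- occurrence count and builds each value list as [mapped value] * count: simpler, same cost.

-- ===== PORT A =====
-- helper map_bitstring; its asserts (bitstring format) are modelled by Pre_gather_values below
def map_bitstring (x : List String) : PySem.Dict String Int :=
  x.foldl (fun res bitstr =>
    if res.contains bitstr then res
    else if PySem.Str.len (PySem.Str.replace bitstr "1" "") > PySem.Str.len (PySem.Str.replace bitstr "0" "") then
      res.insert bitstr 0
    else
      res.insert bitstr 1) PySem.Dict.empty

def gather_values (x : List String) : List (String × List Int) :=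
  let mapnum := map_bitstring x
  let res := (PySem.List.pyRange 0 (PySem.List.len x)).foldl (fun res i =>
    let bitstr := PySem.List.pyGetD x i ""          -- x[i]; i ∈ range(len(x)), always in range
    let value := mapnum.getD bitstr 0               -- mapnum[bitstr]; key always present (map_bitstring covers every element of x), so no KeyError
    if res.contains bitstr then res.modify bitstr [] (fun v => v ++ [value])   -- res[bitstr].append(value)
    else res.insert bitstr [value]) (PySem.Dict.empty : PySem.Dict String (List Int))
  res.items

-- ===== PORT B =====
def gather_values_alt (x : List String) : List (String × List Int) :=
  let counts := x.foldl (fun d b => d.insert b (d.getD b 0 + 1)) (PySem.Dict.empty : PySem.Dict String Int)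
  counts.items.map (fun p =>
    (p.1, List.replicate p.2.toNat (if PySem.Str.count p.1 "0" > PySem.Str.count p.1 "1" then (0 : Int) else 1)))

-- ===== PRECONDITION & SPEC =====
-- Pre_ excludes exactly the inputs where the Python A's asserts raise AssertionError:
-- some string contains a character other than '0'/'1'.
def Pre_gather_values (x : List String) : Prop := (x.all (fun s => s.toList.all (fun c => c == '0' || c == '1'))) = true
instance (x : List String) : Decidable (Pre_gather_values x) := by unfold Pre_gather_values; infer_instance

def pvWitness_gather_values : List String := ["01", "0"]

def Spec_gather_values (x : List String) (out : List (String × List Int)) : Prop := out = gather_values_alt x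
instance (x : List String) (out : List (String × List Int)) : Decidable (Spec_gather_values x out) := by unfold Spec_gather_values; infer_instance

-- ===== CLAIM (what is proved, stated in full; the proofs are below) =====
def Claim_equal_gather_values : Prop := ∀ (x : List String), Dom_gather_values x → Pre_gather_values x → Spec_gather_values x (gather_values x)

-- ===== LEMMAS AND PROOFS =====

-- the value map_bitstring assigns to a string
def mbF (s : String) : Int :=
  if PySem.Str.len (PySem.Str.replace s "1" "") > PySem.Str.len (PySem.Str.replace s "0" "") then 0 else 1

-- the value B assigns to a string
def altF (s : String) : Int :=
  if PySem.Str.count s "0" > PySem.Str.count s "1" then 0 else 1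

-- replacing a single character by "" is filtering it out
theorem replace_go_single (c : Char) (l : List Char) (fuel : Nat) (acc : List Char)
    (h : l.length ≤ fuel) :
    PySem.Chars.replace.go [c] [] fuel l acc = acc.reverse ++ l.filter (fun a => a != c) := by
  induction l generalizing fuel acc with
  | nil => cases fuel <;> simp [PySem.Chars.replace.go]
  | cons c' t ih =>
    cases fuel with
    | zero => simp at h
    | succ f =>
      have ht : t.length ≤ f := by simp at h; omega
      simp only [PySem.Chars.replace.go]
      have hpre : List.isPrefixOf [c] (c' :: t) = (c == c') := by simp [List.isPrefixOf]
      rw [hpre]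
      by_cases hc : c' = c
      · subst hc
        rw [if_pos (by simp)]
        have hdrop : ∀ a : Char, List.drop [a].length (a :: t) = t := fun a => by simp
        rw [hdrop]
        simp only [List.reverse_nil, List.nil_append]
        rw [ih f acc ht]
        simp
      · rw [if_neg (by simp [Ne.symm hc])]
        rw [ih f (c' :: acc) ht]
        simp [hc]

theorem replace_single (cs : List Char) (c : Char) :
    PySem.Chars.replace cs [c] [] = cs.filter (fun a => a != c) := by
  simp [PySem.Chars.replace, replace_go_single c cs cs.length [] (le_refl _)]

-- counting a single character is List.count
theorem count_go_single (c : Char) (l : List Char) (fuel : Nat) (acc : Nat)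
    (h : l.length ≤ fuel) :
    PySem.Chars.count.go [c] fuel l acc = acc + l.count c := by
  induction l generalizing fuel acc with
  | nil => cases fuel <;> simp [PySem.Chars.count.go]
  | cons c' t ih =>
    cases fuel with
    | zero => simp at h
    | succ f =>
      have ht : t.length ≤ f := by simp at h; omega
      simp only [PySem.Chars.count.go]
      have hpre : List.isPrefixOf [c] (c' :: t) = (c == c') := by simp [List.isPrefixOf]
      rw [hpre]
      by_cases hc : c' = c
      · subst hc
        rw [if_pos (by simp)]
        have hdrop : ∀ a : Char, List.drop [a].length (a :: t) = t := fun a => by simp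
        rw [hdrop, ih f (acc + 1) ht]
        simp
        omega
      · rw [if_neg (by simp [Ne.symm hc])]
        rw [ih f acc ht]
        simp [hc]

theorem count_single (cs : List Char) (c : Char) :
    PySem.Chars.count cs [c] = cs.count c := by
  simp [PySem.Chars.count, count_go_single c cs cs.length 0 (le_refl _)]

-- A's replace-length test and B's count test decide the same thing
theorem mbF_eq_altF (s : String) : mbF s = altF s := by
  unfold mbF altF
  have h1 : PySem.Str.len (PySem.Str.replace s "1" "") = (s.toList.filter (fun a => a != '1')).length := by
    simp [PySem.Str.len, PySem.Str.replace, replace_single]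
  have h0 : PySem.Str.len (PySem.Str.replace s "0" "") = (s.toList.filter (fun a => a != '0')).length := by
    simp [PySem.Str.len, PySem.Str.replace, replace_single]
  have hc0 : PySem.Str.count s "0" = s.toList.count '0' := by
    simp [PySem.Str.count, count_single]
  have hc1 : PySem.Str.count s "1" = s.toList.count '1' := by
    simp [PySem.Str.count, count_single]
  have key : ∀ c : Char, (s.toList.filter (fun a => a != c)).length + s.toList.count c = s.toList.length := by
    intro c
    have h := (List.length_eq_length_filter_add (l := s.toList) (fun x => x == c)).symm
    have hcnt : s.toList.count c = (s.toList.filter (fun x => x == c)).length := by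
      rw [List.count, List.countP_eq_length_filter]
    have hsame : s.toList.filter (fun a => a != c) = s.toList.filter (fun a => !(a == c)) := rfl
    rw [hsame, hcnt]
    omega
  rw [h1, h0, hc0, hc1]
  have k0 := key '0'
  have k1 := key '1'
  have hiff : (((s.toList.filter (fun a => a != '0')).length : Int) < ((s.toList.filter (fun a => a != '1')).length : Int))
      ↔ (s.toList.count '1' < s.toList.count '0') := by omega
  simp only [gt_iff_lt]
  rw [if_congr hiff rfl rfl]

-- characterisation of map_bitstring's stored values
theorem mb_getD (l : List String) (d : PySem.Dict String Int) (b : String) :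
    (l.foldl (fun res bitstr =>
      if res.contains bitstr then res
      else if PySem.Str.len (PySem.Str.replace bitstr "1" "") > PySem.Str.len (PySem.Str.replace bitstr "0" "") then
        res.insert bitstr 0
      else
        res.insert bitstr 1) d).getD b 0 =
    if d.contains b then d.getD b 0 else if b ∈ l then mbF b else 0 := by
  induction l generalizing d with
  | nil =>
    simp only [List.foldl_nil, List.not_mem_nil, if_false]
    by_cases hdb : d.contains b
    · simp [hdb]
    · simp only [hdb, Bool.false_eq_true, if_false]
      exact PySem.Dict.getD_of_not_contains d 0 (by simpa using hdb)
  | cons a l ih =>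
    simp only [List.foldl_cons]
    rw [ih]
    by_cases hda : d.contains a
    · simp only [hda, if_true]
      by_cases hdb : d.contains b
      · simp [hdb]
      · by_cases hba : b = a
        · subst hba; simp_all
        · simp [hdb, hba, List.mem_cons]
    · have hstep : (if d.contains a then d
          else if PySem.Str.len (PySem.Str.replace a "1" "") > PySem.Str.len (PySem.Str.replace a "0" "") then
            d.insert a 0 else d.insert a 1) = d.insert a (mbF a) := by
        unfold mbF
        rw [if_neg (by simp [hda])]
        split_ifs <;> rfl
      rw [hstep]
      by_cases hba : b = a
      · subst hba
        simp [hda]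
      · simp [PySem.Dict.contains_insert, PySem.Dict.getD_insert, hba, List.mem_cons]

-- a dict with distinct keys is its key list paired with its lookups
theorem items_eq_aux {κ ν : Type} [BEq κ] [LawfulBEq κ] (l : List (κ × ν)) (d0 : ν)
    (h : (l.map Prod.fst).Nodup) :
    (l.map Prod.fst).map (fun k => (k, (PySem.Dict.mk l).getD k d0)) = l := by
  induction l with
  | nil => simp
  | cons p rest ih =>
    obtain ⟨k0, v0⟩ := p
    simp only [List.map_cons, List.nodup_cons] at h
    obtain ⟨hp, hrest⟩ := h
    simp only [List.map_cons]
    have hh : (PySem.Dict.mk ((k0, v0) :: rest)).getD k0 d0 = v0 := by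
      simp [PySem.Dict.getD_eq_get?_getD, PySem.Dict.get?_mk_cons]
    have htail : (rest.map Prod.fst).map (fun k => (k, (PySem.Dict.mk ((k0, v0) :: rest)).getD k d0))
        = (rest.map Prod.fst).map (fun k => (k, (PySem.Dict.mk rest).getD k d0)) := by
      refine List.map_congr_left (fun k hk => ?_)
      have hne : ¬ (k0 == k) = true := by
        intro he
        exact hp (by simpa [eq_of_beq he] using hk)
      simp [PySem.Dict.getD_eq_get?_getD, PySem.Dict.get?_mk_cons, hne]
    rw [hh, htail, ih hrest]

theorem dict_items_eq {κ ν : Type} [BEq κ] [LawfulBEq κ] (d : PySem.Dict κ ν) (d0 : ν)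
    (h : d.keys.Nodup) :
    d.items = d.keys.map (fun k => (k, d.getD k d0)) := by
  obtain ⟨l⟩ := d
  simp only [PySem.Dict.keys] at h ⊢
  exact (items_eq_aux l d0 h).symm

-- iterating i over range(len(x)) reading x[i] is iterating over x
theorem range_fold {β : Type} (x : List String) (F : β → String → β) (init : β) :
    (PySem.List.pyRange 0 (PySem.List.len x)).foldl
      (fun acc i => F acc (PySem.List.pyGetD x i "")) init = x.foldl F init := by
  rw [← List.foldl_map, PySem.List.map_pyGetD_pyRange_zero]

-- A's result, characterised
theorem A_items (x : List String) :
    gather_values x = (PySem.Set.ofList x).map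
      (fun k => (k, List.replicate (List.count k x) (mbF k))) := by
  unfold gather_values
  dsimp only
  have hrf := range_fold x (fun res b =>
      if res.contains b then res.modify b [] (fun v => v ++ [(map_bitstring x).getD b 0])
      else res.insert b [(map_bitstring x).getD b 0]) PySem.Dict.empty
  rw [hrf]
  have hv : ∀ b, b ∈ x → (map_bitstring x).getD b 0 = mbF b := by
    intro b hb
    unfold map_bitstring
    rw [mb_getD]
    simp [hb]
  have hstep : ∀ (res : PySem.Dict String (List Int)) (b : String),
      (if res.contains b then res.modify b [] (fun v => v ++ [(map_bitstring x).getD b 0])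
       else res.insert b [(map_bitstring x).getD b 0]) =
      res.modify b [] (fun v => v ++ [(map_bitstring x).getD b 0]) := by
    intro res b
    by_cases hc : res.contains b
    · simp [hc]
    · simp only [hc, Bool.false_eq_true, if_false]
      show res.insert b _ = res.insert b _
      rw [PySem.Dict.getD_of_not_contains res [] (by simpa using hc)]
      simp
  simp only [hstep]
  set G := fun (res : PySem.Dict String (List Int)) (b : String) =>
    res.modify b [] (fun v => v ++ [(map_bitstring x).getD b 0]) with hG
  have hkeys : (x.foldl G PySem.Dict.empty).keys = PySem.Set.ofList x := by
    rw [hG]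
    rw [PySem.Dict.keys_foldl_modify x [] (fun d b v => v ++ [(map_bitstring x).getD b 0])]
    rw [PySem.Dict.keys_empty, PySem.Set.ofList_eq_foldl]
    rfl
  have hnodup : (x.foldl G PySem.Dict.empty).keys.Nodup := by
    rw [hkeys]; exact PySem.Set.nodup_ofList x
  have hgetD : ∀ k, (x.foldl G PySem.Dict.empty).getD k [] =
      List.replicate (List.count k x) ((map_bitstring x).getD k 0) := by
    intro k
    have hpair : x.foldl G PySem.Dict.empty =
        (x.map (fun b => (b, (map_bitstring x).getD b 0))).foldl
          (fun d p => d.modify p.1 [] (fun v => v ++ [p.2])) PySem.Dict.empty := by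
      rw [List.foldl_map]
    rw [hpair, PySem.Dict.getD_foldl_modify_append]
    rw [List.filter_map]
    have hcomp : ((fun p => p.1 == k) ∘ (fun b => (b, (map_bitstring x).getD b 0)))
        = fun b => b == k := rfl
    rw [hcomp, List.map_map]
    have hcomp2 : ((fun p : String × Int => p.2) ∘ (fun b => (b, (map_bitstring x).getD b 0)))
        = fun b => (map_bitstring x).getD b 0 := rfl
    rw [hcomp2, List.filter_beq, List.map_replicate]
    simp
  rw [dict_items_eq _ ([] : List Int) hnodup, hkeys]
  refine List.map_congr_left (fun k hk => ?_)
  rw [hgetD, hv k (by simpa [PySem.Set.mem_ofList] using hk)]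

-- B's result, characterised
theorem B_items (x : List String) :
    gather_values_alt x = (PySem.Set.ofList x).map
      (fun k => (k, List.replicate (List.count k x) (altF k))) := by
  unfold gather_values_alt
  dsimp only
  rw [PySem.Dict.foldl_insert_getD_add_one_eq_counter, PySem.Dict.items_counter, List.map_map]
  refine List.map_congr_left (fun k _ => ?_)
  simp [altF]

-- ===== VERDICT (by name: the statement is the Claim_ definition above) =====
theorem gather_values_spec : Claim_equal_gather_values := by
  intro x _ _
  unfold Spec_gather_values
  rw [A_items, B_items]
  exact List.map_congr_left (fun k _ => by rw [mbF_eq_altF])
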